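-- pv_equiv track=rewrite | github.com/temeddix/interview-practice | baekjoon/1644.py | count_pairs
-- ===== SOURCE A (Python) =====
-- def count_pairs(number: int, primes: list[int]) -> int:
--     if not primes:
--         return 0
--
--     prime_count = len(primes)
--     max_cursor = prime_count - 1
--     left_cursor = 0
--     right_cursor = 0
--
--     sum_value = primes[0]
--     pair_count = 0
--     while True:
--         if sum_value < number:
--             if right_cursor == max_cursor:
--                 break
--             right_cursor += 1
--             sum_value += primes[right_cursor]
--         elif sum_value > number:
--             sum_value -= primes[left_cursor]
--             left_cursor += 1
--         else:
--             pair_count += 1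
--             if right_cursor == max_cursor:
--                 break
--             right_cursor += 1
--             sum_value += primes[right_cursor]
--
--     return pair_count
-- ===== SOURCE B (Python) =====
-- def count_pairs(number: int, primes: list[int]) -> int:
--     # prefix-sum + set lookup: a window summing to `number` ends at position j
--     # iff (prefix_sum(j+1) - number) is one of the earlier prefix sums
--     seen = {0}
--     total = 0
--     count = 0
--     for p in primes:
--         total += p
--         if total - number in seen:
--             count += 1
--         seen.add(total)
--     return count
-- ===== Notes on version B (the rewrite author's own statement) =====
-- stated objective: idiomatic
-- what changed: Replaces the two-pointer shrinking/growing window loop with a single forward pass keeping prefix sums in a set and counting hits of (total - number).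
-- outside the precondition, e.g. on count_pairs(0, [2, 3, 5]): A returns 3, B returns 0; on count_pairs(2, [3, -1]): A returns 0, B returns 1; on count_pairs(-1, [2]): A raises IndexError, B returns 0
import Mathlib
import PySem

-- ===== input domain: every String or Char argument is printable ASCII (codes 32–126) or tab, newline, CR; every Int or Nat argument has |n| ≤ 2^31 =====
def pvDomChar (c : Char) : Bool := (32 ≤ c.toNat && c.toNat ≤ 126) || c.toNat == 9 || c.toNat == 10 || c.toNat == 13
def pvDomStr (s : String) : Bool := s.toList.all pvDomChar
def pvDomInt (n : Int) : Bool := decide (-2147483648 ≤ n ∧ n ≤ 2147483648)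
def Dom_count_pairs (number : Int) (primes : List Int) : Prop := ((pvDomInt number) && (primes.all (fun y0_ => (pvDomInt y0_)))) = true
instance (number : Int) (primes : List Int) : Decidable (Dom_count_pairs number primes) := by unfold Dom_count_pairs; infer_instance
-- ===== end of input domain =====

-- B replaces A's two-pointer sliding window by one forward prefix-sum pass with a set of seen
-- prefix sums (idiomatic subarray-sum counting); equal on the domain stated by Pre_.

-- ===== PORT A =====
-- the `while True` loop of A; state = (left_cursor, right_cursor, sum_value, pair_count).
-- The `none => 0` arms are where Python raises IndexError (outside Pre_count_pairs).
def countLoopA (primes : List Int) (number : Int) (left right : Nat) (s pair : Int) : Int :=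
  if s < number then
    if right = primes.length - 1 then pair
    else
      match h : PySem.List.pyGet? primes ((right : Int) + 1) with
      | none => 0
      | some p => countLoopA primes number left (right + 1) (s + p) pair
  else if number < s then
    match h : PySem.List.pyGet? primes ((left : Int)) with
    | none => 0
    | some p => countLoopA primes number (left + 1) right (s - p) pair
  else
    if right = primes.length - 1 then pair + 1
    else
      match h : PySem.List.pyGet? primes ((right : Int) + 1) with
      | none => 0
      | some p => countLoopA primes number left (right + 1) (s + p) (pair + 1)
termination_by (primes.length - left) + (primes.length - right)
decreasing_by
  all_goals
    (norm_cast at h; rw [PySem.List.pyGet?_natCast] at h;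
     have := (List.getElem?_eq_some_iff.mp h).1; omega)

def count_pairs (number : Int) (primes : List Int) : Int :=
  match primes with
  | [] => 0
  | p :: _ => countLoopA primes number 0 0 p 0

-- ===== PORT B =====
def count_pairs_alt (number : Int) (primes : List Int) : Int :=
  (primes.foldl
    (fun (st : PySem.Set Int × Int × Int) p =>
      let total := st.2.1 + p
      let count := if PySem.Set.contains st.1 (total - number) then st.2.2 + 1 else st.2.2
      (PySem.Set.add st.1 total, total, count))
    (PySem.Set.ofList [0], 0, 0)).2.2

-- ===== PRECONDITION & SPEC =====
-- Pre_ excludes inputs on which A still returns but its window arithmetic is accidental: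
-- with number ≤ 0 or negative list entries the shrink/grow steps can skip windows (A returns
-- len(primes) for number = 0 on positive lists, misses windows once entries are negative, and
-- raises IndexError on many such inputs); Pre_ keeps the empty list, nonnegative entries with
-- a positive target (the problem's contract), any single-element list on which A terminates
-- benignly, and every input whose target exceeds the sum of the positive entries (no window
-- can ever reach it).
def Pre_count_pairs (number : Int) (primes : List Int) : Prop :=
  primes = [] ∨
  (1 ≤ number ∧ ∀ p ∈ primes, 0 ≤ p) ∨
  (primes.length = 1 ∧ ∀ p ∈ primes, p ≤ number ∨ 1 ≤ number) ∨
  (primes.map (fun p => max p 0)).sum < number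
instance (number : Int) (primes : List Int) : Decidable (Pre_count_pairs number primes) := by
  unfold Pre_count_pairs; infer_instance

def pvWitness_count_pairs : Int × List Int := (5, [2, 3, 5, 7])

def Spec_count_pairs (number : Int) (primes : List Int) (out : Int) : Prop := out = count_pairs_alt number primes
instance (number : Int) (primes : List Int) (out : Int) : Decidable (Spec_count_pairs number primes out) := by unfold Spec_count_pairs; infer_instance

-- ===== CLAIM (what is proved, stated in full; the proofs are below) =====
def Claim_equal_count_pairs : Prop := ∀ (number : Int) (primes : List Int), Dom_count_pairs number primes → Pre_count_pairs number primes → Spec_count_pairs number primes (count_pairs number primes)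

-- ===== LEMMAS AND PROOFS =====

-- prefix sum of the first k entries
def pfx (primes : List Int) (k : Nat) : Int := (primes.take k).sum

-- "some window ends at index j": pfx (j+1) - number is an earlier (or equal-index) prefix sum
def hitAt (number : Int) (primes : List Int) (j : Nat) : Bool :=
  ((List.range (j + 1)).map (pfx primes)).contains (pfx primes (j + 1) - number)

-- number of window ends among indices 0..k-1
def cnt (number : Int) (primes : List Int) (k : Nat) : Int :=
  ((List.range k).countP (hitAt number primes) : Nat)

lemma pfx_succ (primes : List Int) (k : Nat) (hk : k < primes.length) :
    pfx primes (k + 1) = pfx primes k + primes[k] := by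
  unfold pfx
  exact List.sum_take_succ primes k hk

lemma pfx_le (primes : List Int) (hp : ∀ p ∈ primes, 0 ≤ p) {i j : Nat}
    (hij : i ≤ j) (hj : j ≤ primes.length) : pfx primes i ≤ pfx primes j := by
  induction j with
  | zero => have : i = 0 := by omega
            simp [this]
  | succ j ih =>
    have hj' : j < primes.length := by omega
    have hpos : 0 ≤ primes[j] := hp _ (List.getElem_mem hj')
    rcases Nat.le_succ_iff_eq_or_le.mp hij with h | h
    · simp [h]
    · have := ih h (by omega)
      rw [pfx_succ primes j hj']; omega

lemma hitAt_iff (number : Int) (primes : List Int) (j : Nat) :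
    hitAt number primes j = true ↔
      ∃ i, i < j + 1 ∧ pfx primes i = pfx primes (j + 1) - number := by
  simp [hitAt, List.mem_map, List.mem_range, eq_comm]

lemma cnt_succ (number : Int) (primes : List Int) (k : Nat) :
    cnt number primes (k + 1) =
      cnt number primes k + (if hitAt number primes k then 1 else 0) := by
  simp [cnt, List.range_succ, List.countP_append]

-- ¬hitAt at right, given the two-pointer invariants with sum < number
lemma no_hit (number : Int) (primes : List Int) (hp : ∀ p ∈ primes, 0 ≤ p)
    (left right : Nat) (hr : right < primes.length)
    (hlt : pfx primes (right + 1) - pfx primes left < number)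
    (hinv : ∀ i, i < left → number < pfx primes (right + 1) - pfx primes i) :
    ¬ hitAt number primes right = true := by
  rw [hitAt_iff]
  rintro ⟨i, hi, hEq⟩
  rcases Nat.lt_or_ge i left with h | h
  · have := hinv i h; omega
  · have : pfx primes left ≤ pfx primes i := pfx_le primes hp h (by omega)
    omega

-- A-side: the loop computes cnt over the whole list, under the two-pointer invariants
lemma loopA_eq (number : Int) (primes : List Int)
    (hp : ∀ p ∈ primes, 0 ≤ p) (hn : 1 ≤ number) :
    ∀ m left right s pair,
      (primes.length - left) + (primes.length - right) ≤ m →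
      right < primes.length → left ≤ right + 1 →
      s = pfx primes (right + 1) - pfx primes left →
      (∀ i, i < left → number < pfx primes (right + 1) - pfx primes i) →
      pair = cnt number primes right →
      countLoopA primes number left right s pair = cnt number primes primes.length := by
  intro m
  induction m with
  | zero => intro left right s pair hm hr; omega
  | succ m ih =>
    intro left right s pair hm hr hlr hs hinv hpair
    rw [countLoopA]
    by_cases hlt : s < number
    · rw [if_pos hlt]
      have hnohit : ¬ hitAt number primes right = true :=
        no_hit number primes hp left right hr (hs ▸ hlt) hinv
      have hcnt : cnt number primes (right + 1) = pair := by
        rw [cnt_succ, if_neg hnohit, hpair]; ring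
      by_cases hend : right = primes.length - 1
      · rw [if_pos hend]
        have : right + 1 = primes.length := by omega
        rw [← this, hcnt]
      · rw [if_neg hend]
        have hr1 : right + 1 < primes.length := by omega
        have hcast : ((right : Int) + 1) = ((right + 1 : Nat) : Int) := by push_cast; ring
        have hget : PySem.List.pyGet? primes ((right : Int) + 1) = some primes[right + 1] := by
          rw [hcast, PySem.List.pyGet?_natCast, List.getElem?_eq_getElem hr1]
        rw [hget]
        apply ih (left := left) (right := right + 1)
        · omega
        · exact hr1
        · omega
        · rw [hs, pfx_succ primes (right + 1) hr1]; ring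
        · intro i hi
          have h1 := hinv i hi
          have h2 : pfx primes (right + 1) ≤ pfx primes (right + 1 + 1) :=
            pfx_le primes hp (by omega) (by omega)
          omega
        · rw [← hcnt]
    · rw [if_neg hlt]
      by_cases hgt : number < s
      · rw [if_pos hgt]
        have hll : left ≤ right := by
          by_contra hc
          have hl : left = right + 1 := by omega
          have : s = 0 := by rw [hs, hl]; ring
          omega
        have hln : left < primes.length := by omega
        have hget : PySem.List.pyGet? primes ((left : Int)) = some primes[left] := by
          rw [PySem.List.pyGet?_natCast, List.getElem?_eq_getElem hln]
        rw [hget]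
        apply ih (left := left + 1) (right := right)
        · omega
        · exact hr
        · omega
        · rw [hs, pfx_succ primes left hln]; ring
        · intro i hi
          rcases Nat.lt_or_ge i left with h | h
          · exact hinv i h
          · have : i = left := by omega
            subst this; omega
        · exact hpair
      · rw [if_neg hgt]
        have hEqn : s = number := by omega
        have hll : left ≤ right := by
          by_contra hc
          have hl : left = right + 1 := by omega
          have : s = 0 := by rw [hs, hl]; ring
          omega
        have hhit : hitAt number primes right = true := by
          rw [hitAt_iff]
          exact ⟨left, by omega, by omega⟩
        have hcnt : cnt number primes (right + 1) = pair + 1 := by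
          rw [cnt_succ, if_pos hhit, hpair]
        by_cases hend : right = primes.length - 1
        · rw [if_pos hend]
          have : right + 1 = primes.length := by omega
          rw [← this, hcnt]
        · rw [if_neg hend]
          have hr1 : right + 1 < primes.length := by omega
          have hcast : ((right : Int) + 1) = ((right + 1 : Nat) : Int) := by push_cast; ring
          have hget : PySem.List.pyGet? primes ((right : Int) + 1) = some primes[right + 1] := by
            rw [hcast, PySem.List.pyGet?_natCast, List.getElem?_eq_getElem hr1]
          rw [hget]
          apply ih (left := left) (right := right + 1)
          · omega
          · exact hr1
          · omega
          · rw [hs, pfx_succ primes (right + 1) hr1]; ring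
          · intro i hi
            have h1 := hinv i hi
            have h2 : pfx primes (right + 1) ≤ pfx primes (right + 1 + 1) :=
              pfx_le primes hp (by omega) (by omega)
            omega
          · rw [← hcnt]

-- B-side: the fold step, named
def stepB (number : Int) : PySem.Set Int × Int × Int → Int → PySem.Set Int × Int × Int :=
  fun st p =>
    let total := st.2.1 + p
    let count := if PySem.Set.contains st.1 (total - number) then st.2.2 + 1 else st.2.2
    (PySem.Set.add st.1 total, total, count)

lemma contains_ofList_int (l : List Int) (v : Int) :
    PySem.Set.contains (PySem.Set.ofList l) v = l.contains v := by
  by_cases h : v ∈ l <;>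
    simp [PySem.Set.contains_eq_listContains, PySem.Set.mem_ofList, h]

lemma ofList_append_singleton_int (l : List Int) (x : Int) :
    PySem.Set.ofList (l ++ [x]) = PySem.Set.add (PySem.Set.ofList l) x := by
  rw [PySem.Set.ofList_eq_foldl, PySem.Set.ofList_eq_foldl, List.foldl_append]
  rfl

-- B-side invariant: after the first k entries the state is
-- (set of prefix sums so far, current prefix sum, number of hits so far)
lemma foldB_eq (number : Int) (primes : List Int) :
    ∀ k, k ≤ primes.length →
      (primes.take k).foldl (stepB number) (PySem.Set.ofList [0], 0, 0) =
        (PySem.Set.ofList ((List.range (k + 1)).map (pfx primes)),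
          pfx primes k, cnt number primes k) := by
  intro k
  induction k with
  | zero =>
    intro _
    simp [pfx, cnt]
  | succ k ih =>
    intro hk
    have hk' : k < primes.length := by omega
    rw [List.take_add_one, List.getElem?_eq_getElem hk', Option.toList_some,
      List.foldl_append, ih (by omega)]
    have htot : pfx primes k + primes[k] = pfx primes (k + 1) :=
      (pfx_succ primes k hk').symm
    have hcontains :
        PySem.Set.contains (PySem.Set.ofList ((List.range (k + 1)).map (pfx primes)))
          (pfx primes (k + 1) - number) = hitAt number primes k := by
      rw [contains_ofList_int]; rfl
    simp only [List.foldl_cons, List.foldl_nil, stepB, htot, hcontains]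
    rw [List.range_succ (n := k + 1), List.map_append, cnt_succ]
    simp only [List.map_cons, List.map_nil]
    rw [ofList_append_singleton_int]
    split <;> rename_i h <;> simp [h]

-- B computes cnt over the whole list, for every input
lemma altB_eq (number : Int) (primes : List Int) :
    count_pairs_alt number primes = cnt number primes primes.length := by
  unfold count_pairs_alt
  have h := foldB_eq number primes primes.length (le_refl _)
  rw [List.take_length] at h
  rw [show (fun (st : PySem.Set Int × Int × Int) p =>
    (PySem.Set.add st.1 (st.2.1 + p), st.2.1 + p,
      if PySem.Set.contains st.1 (st.2.1 + p - number) then st.2.2 + 1 else st.2.2))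
    = stepB number from rfl, h]

-- positive-part prefix sums, for the "target out of reach" case
lemma window_le_possum (primes : List Int) {i j : Nat}
    (hij : i ≤ j) (hj : j ≤ primes.length) :
    pfx primes j - pfx primes i ≤ (primes.map (fun p => max p 0)).sum := by
  have key : ∀ a b : Nat, a ≤ b → b ≤ primes.length →
      pfx primes b - pfx primes a ≤
        ((primes.map (fun p => max p 0)).take b).sum
          - ((primes.map (fun p => max p 0)).take a).sum := by
    intro a b hab hb
    induction b with
    | zero => have : a = 0 := by omega
              simp [this]
    | succ b ihb =>
      have hb' : b < primes.length := by omega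
      have hbm : b < (primes.map (fun p => max p 0)).length := by
        simpa using hb'
      rcases Nat.le_succ_iff_eq_or_le.mp hab with h | h
      · simp [h]
      · have h1 := ihb h (by omega)
        have h2 := pfx_succ primes b hb'
        have h3 := List.sum_take_succ (primes.map (fun p => max p 0)) b hbm
        have h4 : (primes.map (fun p => max p 0))[b] = max primes[b] 0 := by
          simp
        have h5 : primes[b] ≤ max primes[b] 0 := le_max_left _ _
        rw [h2, h3, h4]; omega
  have h1 := key i j hij hj
  have h2 : ((primes.map (fun p => max p 0)).take j).sum ≤
      (primes.map (fun p => max p 0)).sum := by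
    have := List.sum_take_add_sum_drop (primes.map (fun p => max p 0)) j
    have hd : 0 ≤ ((primes.map (fun p => max p 0)).drop j).sum := by
      apply List.sum_nonneg
      intro x hx
      have := List.mem_of_mem_drop hx
      rw [List.mem_map] at this
      obtain ⟨p, _, hp⟩ := this
      rw [← hp]; exact le_max_right _ _
    omega
  have h3 : 0 ≤ ((primes.map (fun p => max p 0)).take i).sum := by
    apply List.sum_nonneg
    intro x hx
    have := List.mem_of_mem_take hx
    rw [List.mem_map] at this
    obtain ⟨p, _, hp⟩ := this
    rw [← hp]; exact le_max_right _ _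
  omega

-- when the target is out of reach, A's loop only ever grows the window and returns 0
lemma loopA_zero (number : Int) (primes : List Int)
    (hbig : (primes.map (fun p => max p 0)).sum < number) :
    ∀ m right, primes.length - right ≤ m → right < primes.length →
      countLoopA primes number 0 right (pfx primes (right + 1)) 0 = 0 := by
  intro m
  induction m with
  | zero => intro right hm hr; omega
  | succ m ih =>
    intro right hm hr
    have hlt : pfx primes (right + 1) < number := by
      have hw := window_le_possum primes (i := 0) (j := right + 1) (by omega) (by omega)
      have h0 : pfx primes 0 = 0 := rfl
      omega
    rw [countLoopA, if_pos hlt]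
    by_cases hend : right = primes.length - 1
    · rw [if_pos hend]
    · rw [if_neg hend]
      have hr1 : right + 1 < primes.length := by omega
      have hcast : ((right : Int) + 1) = ((right + 1 : Nat) : Int) := by push_cast; ring
      have hget : PySem.List.pyGet? primes ((right : Int) + 1) = some primes[right + 1] := by
        rw [hcast, PySem.List.pyGet?_natCast, List.getElem?_eq_getElem hr1]
      rw [hget]
      show countLoopA primes number 0 (right + 1) (pfx primes (right + 1) + primes[right + 1]) 0 = 0
      rw [show pfx primes (right + 1) + primes[right + 1] = pfx primes (right + 1 + 1) from
        (pfx_succ primes (right + 1) hr1).symm]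
      exact ih (right + 1) (by omega) hr1

-- when the target is out of reach, no index is a hit
lemma cnt_zero (number : Int) (primes : List Int)
    (hbig : (primes.map (fun p => max p 0)).sum < number) :
    ∀ k, k ≤ primes.length → cnt number primes k = 0 := by
  intro k
  induction k with
  | zero => intro _; simp [cnt]
  | succ k ih =>
    intro hk
    rw [cnt_succ, ih (by omega)]
    have hnohit : ¬ hitAt number primes k = true := by
      rw [hitAt_iff]
      rintro ⟨i, hi, hEq⟩
      have := window_le_possum primes (i := i) (j := k + 1) (by omega) (by omega)
      omega
    rw [if_neg hnohit]
    ring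

-- ===== VERDICT (by name: the statement is the Claim_ definition above) =====
theorem count_pairs_spec : Claim_equal_count_pairs := by
  intro number primes _ hpre
  unfold Spec_count_pairs
  rw [altB_eq]
  rcases hpre with hemp | ⟨hn, hp⟩ | ⟨hone, hsing⟩ | hbig
  · subst hemp
    simp [count_pairs, cnt]
  · match hpr : primes with
    | [] => simp [count_pairs, cnt]
    | q :: rest =>
      unfold count_pairs
      apply loopA_eq number (q :: rest) hp hn (2 * (q :: rest).length)
      · omega
      · simp
      · omega
      · simp [pfx]
      · omega
      · simp [cnt]
  · match hpr : primes with
    | [] => simp at hone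
    | q :: w :: rest => simp at hone
    | [q] =>
      have hq := hsing q (by simp)
      unfold count_pairs
      have hcnt1 : cnt number [q] 1 = if q = number then 1 else 0 := by
        rw [show (1 : Nat) = 0 + 1 from rfl, cnt_succ]
        have : hitAt number [q] 0 = decide (q = number) := by
          simp [hitAt, pfx, eq_comm]
          constructor
          · intro h; omega
          · intro h; omega
        rw [this]
        simp [cnt]
      rw [show ([q] : List Int).length = 1 from rfl, hcnt1]
      show countLoopA [q] number 0 0 q 0 = if q = number then 1 else 0
      rw [countLoopA]
      by_cases hlt : q < number
      · rw [if_pos hlt, if_pos (by simp)]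
        rw [if_neg (by omega)]
      · rw [if_neg hlt]
        by_cases hgt : number < q
        · have hn : 1 ≤ number := by
            rcases hq with h | h
            · omega
            · exact h
          rw [if_pos hgt]
          show countLoopA [q] number (0 + 1) 0 (q - q) 0 = if q = number then 1 else 0
          rw [countLoopA]
          rw [if_pos (by omega : q - q < number), if_pos (by simp)]
          rw [if_neg (by omega)]
        · have heq : q = number := by omega
          rw [if_neg hgt]
          rw [if_pos (show (0 : Nat) = [q].length - 1 from rfl)]
          rw [if_pos heq]
          norm_num
  · match hpr : primes with
    | [] => simp [count_pairs, cnt]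
    | q :: rest =>
      unfold count_pairs
      have h0 : q = pfx (q :: rest) (0 + 1) := by simp [pfx]
      have hz := loopA_zero number (q :: rest) hbig (q :: rest).length 0 (by omega) (by simp)
      rw [← h0] at hz
      rw [cnt_zero number (q :: rest) hbig (q :: rest).length (le_refl _)]
      exact hz
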